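-- pv_equiv track=rewrite | github.com/emanuelle0/estudo | 3 - Python Introduction/deck_of_cards.py | countPointers
-- ===== SOURCE A (Python) =====
-- def countPointers(listPoints):
--     pointsOne = 0
--     pointsTwo = 0
--     for i in listPoints:
--         if i ==  1:
--             pointsOne += 1
--         elif i == 0:
--             pointsTwo += 1
--         else:
--             pointsTwo += 1
--             pointsOne += 1
--     if pointsOne > pointsTwo:
--         return f'Player One Wins {pointsOne} x {pointsTwo}'
--     elif pointsTwo > pointsOne:
--         return f'Player Two Wins {pointsTwo} x {pointsOne}'
--     else:
--         return 'Its a draw.'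
-- ===== SOURCE B (Python) =====
-- def countPointers(listPoints):
--     pointsOne = sum(1 for i in listPoints if i != 0)
--     pointsTwo = sum(1 for i in listPoints if i != 1)
--     if pointsOne > pointsTwo:
--         return f'Player One Wins {pointsOne} x {pointsTwo}'
--     if pointsTwo > pointsOne:
--         return f'Player Two Wins {pointsTwo} x {pointsOne}'
--     return 'Its a draw.'
-- ===== Notes on version B (the rewrite author's own statement) =====
-- stated objective: simpler
-- what changed: Replaces the three-way branching accumulation loop with two direct condition counts (pointsOne = #elements != 0, pointsTwo = #elements != 1), then the same winner comparison.
import Mathlib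
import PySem

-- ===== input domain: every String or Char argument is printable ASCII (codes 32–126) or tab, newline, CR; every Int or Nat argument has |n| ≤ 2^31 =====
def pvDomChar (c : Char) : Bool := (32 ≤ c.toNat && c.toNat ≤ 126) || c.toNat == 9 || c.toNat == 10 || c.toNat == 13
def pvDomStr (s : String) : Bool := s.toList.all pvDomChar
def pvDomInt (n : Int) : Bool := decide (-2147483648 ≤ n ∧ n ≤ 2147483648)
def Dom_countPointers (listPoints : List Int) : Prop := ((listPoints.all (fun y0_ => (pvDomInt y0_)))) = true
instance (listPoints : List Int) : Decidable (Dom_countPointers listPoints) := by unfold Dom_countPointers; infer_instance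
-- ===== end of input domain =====

-- ===== PORT A =====
-- B replaces A's three-way branching loop by two direct condition counts; same winner message (objective: simpler).
def countPointers (listPoints : List Int) : String :=
  let st := listPoints.foldl (fun (p : Int × Int) i =>
    if i == 1 then (p.1 + 1, p.2)
    else if i == 0 then (p.1, p.2 + 1)
    else (p.1 + 1, p.2 + 1)) (0, 0)
  if st.1 > st.2 then
    "Player One Wins " ++ PySem.Int.toStr st.1 ++ " x " ++ PySem.Int.toStr st.2
  else if st.2 > st.1 then
    "Player Two Wins " ++ PySem.Int.toStr st.2 ++ " x " ++ PySem.Int.toStr st.1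
  else "Its a draw."

-- ===== PORT B =====
def countPointers_alt (listPoints : List Int) : String :=
  let pointsOne : Int := (listPoints.countP (fun i => i != 0) : Nat)
  let pointsTwo : Int := (listPoints.countP (fun i => i != 1) : Nat)
  if pointsOne > pointsTwo then
    "Player One Wins " ++ PySem.Int.toStr pointsOne ++ " x " ++ PySem.Int.toStr pointsTwo
  else if pointsTwo > pointsOne then
    "Player Two Wins " ++ PySem.Int.toStr pointsTwo ++ " x " ++ PySem.Int.toStr pointsOne
  else "Its a draw."

-- ===== PRECONDITION & SPEC =====
def Spec_countPointers (listPoints : List Int) (out : String) : Prop := out = countPointers_alt listPoints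
instance (listPoints : List Int) (out : String) : Decidable (Spec_countPointers listPoints out) := by unfold Spec_countPointers; infer_instance

-- ===== CLAIM (what is proved, stated in full; the proofs are below) =====
def Claim_equal_countPointers : Prop := ∀ (listPoints : List Int), Dom_countPointers listPoints → Spec_countPointers listPoints (countPointers listPoints)

-- ===== LEMMAS AND PROOFS =====

theorem countPointers_fold (l : List Int) (a b : Int) :
    l.foldl (fun (p : Int × Int) i =>
      if i == 1 then (p.1 + 1, p.2)
      else if i == 0 then (p.1, p.2 + 1)
      else (p.1 + 1, p.2 + 1)) (a, b)
    = (a + (l.countP (fun i => i != 0) : Nat), b + (l.countP (fun i => i != 1) : Nat)) := by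
  induction l generalizing a b with
  | nil => simp
  | cons x xs ih =>
    rw [List.foldl_cons]
    split_ifs with h1 h0 <;> rw [ih] <;> simp_all [Prod.ext_iff] <;> omega

-- ===== VERDICT (by name: the statement is the Claim_ definition above) =====
theorem countPointers_spec : Claim_equal_countPointers := by
  intro l _
  unfold Spec_countPointers countPointers countPointers_alt
  rw [countPointers_fold]
  simp
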